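-- pv_equiv track=rewrite | github.com/SimonYip22/Hybrid-Clinical-Notes-Extraction-Pipeline | src/deterministic_extraction/extraction_rules/symptom_rules.py | is_negated_simple
-- ===== SOURCE A (Python) =====
-- NEGATION_TERMS = {"no", "denies", "denied", "without", "not", "negative"}
--
-- NEGATION_BREAKS = {"but", "however", "although"}
--
-- def is_negated_simple(tokens, token_idx):
--     """
--     Purpose:
--         Determine whether a symptom mention is negated based on
--         preceding tokens in the sentence.
--
--     Logic:
--         - Scan tokens before the symptom
--         - Activate negation when a negation term is found
--         - Deactivate negation when a break term is found
--         - Final state determines whether the symptom is negated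
--
--     Input:
--         tokens: List[str]
--             Tokenised sentence (lowercased words)
--
--         token_idx: int
--             Index of the token where the symptom begins
--
--     Output:
--         bool:
--             True  → symptom is negated
--             False → symptom is not negated
--
--     Example:
--         "denies chest pain"
--             → True
--         "no chest pain but nausea"
--             → pain = True
--             → nausea = False
--
--     Limitations:
--         - Does not model full negation scope (e.g. lists, conjunctions)
--         - Does not capture syntactic structure or uncertainty
--         - Assumes negation is local and linear
--     """
--
--     # Default to non-negated if no tokens before symptom
--     negation_active = False
--
--     # Loop over tokens before the symptom occurrence (token_idx)
--     for t in tokens[:token_idx]: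
--         # Check for negation terms in the preceding tokens
--         if t in NEGATION_TERMS:
--             # Activate negation
--             negation_active = True
--         # Check for break terms in the preceding tokens
--         if t in NEGATION_BREAKS:
--             # Deactivate negation
--             negation_active = False
--
--     return negation_active
-- ===== SOURCE B (Python) =====
-- NEGATION_TERMS = {"no", "denies", "denied", "without", "not", "negative"}
--
-- NEGATION_BREAKS = {"but", "however", "although"}
--
-- def is_negated_simple(tokens, token_idx):
--     # Scan backwards from the symptom: the nearest decisive token wins.
--     for t in reversed(tokens[:token_idx]):
--         if t in NEGATION_TERMS:
--             return True
--         if t in NEGATION_BREAKS: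
--             return False
--     return False
-- ===== Notes on version B (the rewrite author's own statement) =====
-- stated objective: simpler
-- what changed: Replaces the forward fold of a mutable negation flag over all preceding tokens by a reverse scan with early return at the first decisive token (the two term sets are disjoint, so the last forward flag-setter is the first backward hit).
import Mathlib
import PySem

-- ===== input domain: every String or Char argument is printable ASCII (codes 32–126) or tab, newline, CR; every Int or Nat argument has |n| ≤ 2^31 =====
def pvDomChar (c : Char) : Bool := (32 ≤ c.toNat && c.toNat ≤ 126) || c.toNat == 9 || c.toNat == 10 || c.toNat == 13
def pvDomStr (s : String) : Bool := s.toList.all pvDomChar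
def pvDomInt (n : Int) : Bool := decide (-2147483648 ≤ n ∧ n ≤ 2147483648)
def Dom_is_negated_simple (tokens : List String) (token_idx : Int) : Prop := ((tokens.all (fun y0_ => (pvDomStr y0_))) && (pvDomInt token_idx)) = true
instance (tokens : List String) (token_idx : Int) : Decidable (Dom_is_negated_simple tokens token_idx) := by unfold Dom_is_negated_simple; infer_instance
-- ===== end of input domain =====

-- B replaces A's forward fold of a mutable flag by a reverse scan with early exit (objective: simpler).

-- ===== PORT A =====
def pvNegTerms : List String := ["no", "denies", "denied", "without", "not", "negative"]
def pvNegBreaks : List String := ["but", "however", "although"]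

def is_negated_simple (tokens : List String) (token_idx : Int) : Bool :=
  (PySem.List.slice tokens none (some token_idx)).foldl
    (fun negation_active t =>
      let a1 := if pvNegTerms.contains t then true else negation_active
      if pvNegBreaks.contains t then false else a1) false

-- ===== PORT B =====
-- backward scan: first decisive token decides, else false
def pvScanBack : List String → Bool
  | [] => false
  | t :: rest =>
      if pvNegTerms.contains t then true
      else if pvNegBreaks.contains t then false
      else pvScanBack rest

def is_negated_simple_alt (tokens : List String) (token_idx : Int) : Bool :=
  pvScanBack (PySem.List.slice tokens none (some token_idx)).reverse

-- ===== PRECONDITION & SPEC =====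
def Spec_is_negated_simple (tokens : List String) (token_idx : Int) (out : Bool) : Prop := out = is_negated_simple_alt tokens token_idx
instance (tokens : List String) (token_idx : Int) (out : Bool) : Decidable (Spec_is_negated_simple tokens token_idx out) := by unfold Spec_is_negated_simple; infer_instance

-- ===== CLAIM (what is proved, stated in full; the proofs are below) =====
def Claim_equal_is_negated_simple : Prop := ∀ (tokens : List String) (token_idx : Int), Dom_is_negated_simple tokens token_idx → Spec_is_negated_simple tokens token_idx (is_negated_simple tokens token_idx)

-- ===== LEMMAS AND PROOFS =====

-- the two literal term sets are disjoint
theorem pv_disjoint (t : String) (h : t ∈ pvNegTerms) : t ∉ pvNegBreaks := by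
  simp [pvNegTerms] at h
  rcases h with rfl | rfl | rfl | rfl | rfl | rfl <;> decide

-- if no token of m is decisive, the backward scan returns false
theorem pvScanBack_none (m : List String)
    (h : ∀ t ∈ m, t ∉ pvNegTerms ∧ t ∉ pvNegBreaks) :
    pvScanBack m = false := by
  induction m with
  | nil => rfl
  | cons t rest ih =>
      obtain ⟨h1, h2⟩ := h t (by simp)
      simp only [pvScanBack]
      rw [if_neg (by simpa using h1), if_neg (by simpa using h2)]
      exact ih (fun x hx => h x (by simp [hx]))

-- A's forward fold equals the backward scan when some token is decisive, else the accumulator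
theorem pv_key (l : List String) (acc : Bool) :
    l.foldl (fun negation_active t =>
        let a1 := if pvNegTerms.contains t then true else negation_active
        if pvNegBreaks.contains t then false else a1) acc
      = if l.any (fun t => pvNegTerms.contains t || pvNegBreaks.contains t)
        then pvScanBack l.reverse else acc := by
  induction l using List.reverseRecOn generalizing acc with
  | nil => simp
  | append_singleton xs t ih =>
      rw [List.foldl_append]
      simp only [List.foldl_cons, List.foldl_nil, List.any_append, List.reverse_append,
        List.reverse_singleton, List.singleton_append, List.any_cons, List.any_nil]
      by_cases hN : t ∈ pvNegTerms
      · have hB := pv_disjoint t hN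
        simp [pvScanBack, hN, hB]
      · by_cases hB : t ∈ pvNegBreaks
        · simp [pvScanBack, hN, hB]
        · rw [ih acc]
          simp [pvScanBack, hN, hB]

-- ===== VERDICT (by name: the statement is the Claim_ definition above) =====
theorem is_negated_simple_spec : Claim_equal_is_negated_simple := by
  intro tokens token_idx _
  unfold Spec_is_negated_simple is_negated_simple is_negated_simple_alt
  set l := PySem.List.slice tokens none (some token_idx) with hl
  rw [pv_key]
  by_cases h : l.any (fun t => pvNegTerms.contains t || pvNegBreaks.contains t) = true
  · rw [if_pos h]
  · rw [if_neg h]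
    refine (pvScanBack_none l.reverse ?_).symm
    intro t ht
    simp only [List.any_eq_true, not_exists, not_and, Bool.or_eq_true,
      List.contains_eq_mem, decide_eq_true_eq, not_or] at h
    exact h t (List.mem_reverse.mp ht)
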